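-- pv_equiv track=rewrite | github.com/AdamZhouSE/pythonHomework | Code/CodeRecords/2841/59140/306643.py | Xenia
-- ===== SOURCE A (Python) =====
-- def Xenia(flag, res):
--     if len(res)==1:
--         return res[0]
--     else:
--         if flag:
--             t=[]
--             for i in range(0,len(res),2):
--                 t.append(res[i]|res[i+1])
--             res=t.copy()
--             return Xenia(False,res)
--         else:
--             t = []
--             for i in range(0, len(res), 2):
--                 t.append(res[i] ^ res[i + 1])
--             res = t.copy()
--             return Xenia(True,res)
-- ===== SOURCE B (Python) =====
-- def Xenia(flag, res):
--     n = len(res)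
--     if n == 1:
--         return res[0]
--     half = n // 2
--     left = Xenia(flag, res[:half])
--     right = Xenia(flag, res[half:])
--     use_or = flag if (n.bit_length() - 1) % 2 == 1 else not flag
--     return (left | right) if use_or else (left ^ right)
-- ===== Notes on version B (the rewrite author's own statement) =====
-- stated objective: alternative
-- what changed: Replaces A's level-by-level rebuild of the whole array with alternating OR/XOR passes by a divide-and-conquer recursion on the two halves that picks the top-level operator from the parity of log2(len(res)); Pre_ excludes inputs where A never returns (IndexError on nonempty lengths that are not a power of two, infinite recursion on []).
import Mathlib
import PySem

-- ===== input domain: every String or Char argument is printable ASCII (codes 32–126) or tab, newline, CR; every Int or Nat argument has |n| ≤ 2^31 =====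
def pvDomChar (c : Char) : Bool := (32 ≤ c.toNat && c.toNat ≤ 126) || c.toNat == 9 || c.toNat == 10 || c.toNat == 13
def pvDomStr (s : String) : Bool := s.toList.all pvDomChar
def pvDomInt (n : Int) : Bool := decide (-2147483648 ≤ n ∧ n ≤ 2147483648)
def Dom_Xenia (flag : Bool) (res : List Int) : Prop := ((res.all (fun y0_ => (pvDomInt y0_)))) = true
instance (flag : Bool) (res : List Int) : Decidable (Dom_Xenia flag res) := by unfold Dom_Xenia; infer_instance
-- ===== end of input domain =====

-- B replaces A's level-by-level pairwise reduction (tail recursion rebuilding the whole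
-- array each level) with a divide-and-conquer on halves choosing the top operator from
-- the parity of log2(n); objective: alternative decomposition, same exact values.


-- ===== PORT A =====
-- one OR-level: t = []; for i in range(0, len(res), 2): t.append(res[i] | res[i+1])
-- (pyGetD default 0 is only reached where Python raises IndexError — excluded by Pre_)
def XeniaOrLevel (res : List Int) : List Int :=
  (PySem.List.pyRange 0 (PySem.List.len res) 2).foldl
    (fun t i => t ++ [PySem.Int.bor (PySem.List.pyGetD res i 0) (PySem.List.pyGetD res (i + 1) 0)]) []

-- one XOR-level, same loop shape
def XeniaXorLevel (res : List Int) : List Int :=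
  (PySem.List.pyRange 0 (PySem.List.len res) 2).foldl
    (fun t i => t ++ [PySem.Int.bxor (PySem.List.pyGetD res i 0) (PySem.List.pyGetD res (i + 1) 0)]) []

theorem XeniaOrLevel_length (res : List Int) :
    (XeniaOrLevel res).length = ((PySem.List.len res + 1) / 2).toNat := by
  rw [XeniaOrLevel, PySem.List.foldl_append_singleton_eq_map, List.nil_append, List.length_map,
    PySem.List.pyRange_of_pos 0 _ (by omega : (0:Int) < 2), List.length_map, List.length_range]
  rw [PySem.List.len_eq]
  split <;> omega

theorem XeniaXorLevel_length (res : List Int) :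
    (XeniaXorLevel res).length = ((PySem.List.len res + 1) / 2).toNat := by
  rw [XeniaXorLevel, PySem.List.foldl_append_singleton_eq_map, List.nil_append, List.length_map,
    PySem.List.pyRange_of_pos 0 _ (by omega : (0:Int) < 2), List.length_map, List.length_range]
  rw [PySem.List.len_eq]
  split <;> omega

def Xenia (flag : Bool) (res : List Int) : Int :=
  if h1 : PySem.List.len res == 1 then PySem.List.pyGetD res 0 0
  else if h0 : res.length = 0 then 0   -- totality guard: Python recurses forever on []
  else
    if flag then Xenia false (XeniaOrLevel res)
    else Xenia true (XeniaXorLevel res)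
termination_by res.length
decreasing_by
  · have := XeniaOrLevel_length res
    rw [PySem.List.len_eq] at this
    simp [PySem.List.len_eq] at h1
    omega
  · have := XeniaXorLevel_length res
    rw [PySem.List.len_eq] at this
    simp [PySem.List.len_eq] at h1
    omega

-- ===== PORT B =====
def Xenia_alt (flag : Bool) (res : List Int) : Int :=
  let n : Int := PySem.List.len res
  if h1 : n == 1 then PySem.List.pyGetD res 0 0
  else if h0 : res.length = 0 then 0   -- totality guard: Python recurses forever on []
  else
    let half := PySem.Int.floordiv n 2
    let left := Xenia_alt flag (PySem.List.slice res none (some half))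
    let right := Xenia_alt flag (PySem.List.slice res (some half) none)
    let useOr := if PySem.Int.mod (PySem.Int.bitLength n - 1) 2 == 1 then flag else !flag
    if useOr then PySem.Int.bor left right else PySem.Int.bxor left right
termination_by res.length
decreasing_by
  all_goals
    have hl1 : res.length ≠ 1 := by
      intro hx
      apply h1
      show (PySem.List.len res == 1) = true
      simp [PySem.List.len_eq, hx]
    have e : PySem.Int.floordiv (PySem.List.len res) 2 = ((res.length / 2 : Nat) : Int) := by
      rw [PySem.List.len_eq]
      exact_mod_cast PySem.Int.floordiv_natCast res.length 2
    rw [e]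
  · rw [PySem.List.slice_to res (by omega)]
    simp
    omega
  · rw [PySem.List.slice_from res (by omega)]
    simp
    omega

-- ===== PRECONDITION & SPEC =====
-- Pre_ : len(res) is a power of two. On other nonempty lengths Python A raises
-- IndexError (res[i+1] past the end at some level); on [] it recurses forever.
def Pre_Xenia (flag : Bool) (res : List Int) : Prop :=
  res.length = 2 ^ Nat.log2 res.length
instance (flag : Bool) (res : List Int) : Decidable (Pre_Xenia flag res) := by
  unfold Pre_Xenia; infer_instance

def pvWitness_Xenia : Bool × List Int := (true, [3, 5, 6, 12])

def Spec_Xenia (flag : Bool) (res : List Int) (out : Int) : Prop := out = Xenia_alt flag res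
instance (flag : Bool) (res : List Int) (out : Int) : Decidable (Spec_Xenia flag res out) := by
  unfold Spec_Xenia; infer_instance

-- ===== CLAIM (what is proved, stated in full; the proofs are below) =====
def Claim_equal_Xenia : Prop := ∀ (flag : Bool) (res : List Int),
  Dom_Xenia flag res → Pre_Xenia flag res → Spec_Xenia flag res (Xenia flag res)

-- ===== LEMMAS AND PROOFS =====

-- structural view of one level: combine adjacent pairs with g
def gpairs (g : Int → Int → Int) : List Int → List Int
  | a :: b :: t => g a b :: gpairs g t
  | _ => []

theorem gpairs_nil (g : Int → Int → Int) : gpairs g [] = [] := rfl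

theorem gpairs_cons₂ (g : Int → Int → Int) (a b : Int) (t : List Int) :
    gpairs g (a :: b :: t) = g a b :: gpairs g t := rfl

-- the operator applied at the top of a reduction: OR iff c
def topOp (c : Bool) (x y : Int) : Int :=
  if c then PySem.Int.bor x y else PySem.Int.bxor x y

theorem gpairs_length2 (g : Int → Int → Int) : ∀ (m : Nat) (l : List Int),
    l.length = 2 * m → (gpairs g l).length = m := by
  intro m
  induction m with
  | zero => intro l hl; match l, hl with | [], _ => rfl
  | succ m ih =>
    intro l hl
    match l with
    | a :: b :: t =>
      have ht : t.length = 2 * m := by simp at hl; omega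
      simp [gpairs_cons₂, ih t ht]

theorem gpairs_append (g : Int → Int → Int) : ∀ (m : Nat) (l r : List Int),
    l.length = 2 * m → gpairs g (l ++ r) = gpairs g l ++ gpairs g r := by
  intro m
  induction m with
  | zero => intro l r hl; match l, hl with | [], _ => simp [gpairs_nil]
  | succ m ih =>
    intro l r hl
    match l with
    | a :: b :: t =>
      have ht : t.length = 2 * m := by simp at hl; omega
      simp only [List.cons_append, gpairs_cons₂]
      rw [ih t r ht]

-- the indexed level map equals the structural pairs, on even length
theorem map_range_gpairs (g : Int → Int → Int) : ∀ (m : Nat) (l : List Int),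
    l.length = 2 * m →
    (List.range m).map
      (fun (k : Nat) => g (PySem.List.pyGetD l (2 * (k : Int)) 0)
                          (PySem.List.pyGetD l (2 * (k : Int) + 1) 0)) = gpairs g l := by
  intro m
  induction m with
  | zero => intro l hl; match l, hl with | [], _ => rfl
  | succ m ih =>
    intro l hl
    match l with
    | a :: b :: t =>
      have ht : t.length = 2 * m := by simp at hl; omega
      rw [List.range_succ_eq_map, List.map_cons, List.map_map]
      show _ :: _ = g a b :: gpairs g t
      congr 1
      · show g (PySem.List.pyGetD (a :: b :: t) (2 * ((0 : Nat) : Int)) 0)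
              (PySem.List.pyGetD (a :: b :: t) (2 * ((0 : Nat) : Int) + 1) 0) = g a b
        have i0 : 2 * ((0 : Nat) : Int) = ((0 : Nat) : Int) := by norm_num
        have i1 : 2 * ((0 : Nat) : Int) + 1 = ((1 : Nat) : Int) := by norm_num
        rw [i1, i0, PySem.List.pyGetD_natCast, PySem.List.pyGetD_natCast]
        rfl
      · rw [← ih t ht]
        apply List.map_congr_left
        intro k _
        show g (PySem.List.pyGetD (a :: b :: t) (2 * ((k + 1 : Nat) : Int)) 0)
              (PySem.List.pyGetD (a :: b :: t) (2 * ((k + 1 : Nat) : Int) + 1) 0) = _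
        have e2 : 2 * ((k + 1 : Nat) : Int) + 1 = ((2 * k + 3 : Nat) : Int) := by push_cast; ring
        have e1 : 2 * ((k + 1 : Nat) : Int) = ((2 * k + 2 : Nat) : Int) := by push_cast; ring
        have e4 : 2 * ((k : Nat) : Int) + 1 = ((2 * k + 1 : Nat) : Int) := by push_cast; ring
        have e3 : 2 * ((k : Nat) : Int) = ((2 * k : Nat) : Int) := by push_cast; ring
        rw [e2, e1, e4, e3, PySem.List.pyGetD_natCast, PySem.List.pyGetD_natCast,
          PySem.List.pyGetD_natCast, PySem.List.pyGetD_natCast,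
          show 2 * k + 2 = (2 * k) + 1 + 1 from by ring,
          show 2 * k + 3 = (2 * k + 1) + 1 + 1 from by ring,
          List.getD_cons_succ, List.getD_cons_succ, List.getD_cons_succ, List.getD_cons_succ]

theorem orLevel_eq (m : Nat) (l : List Int) (hl : l.length = 2 * m) :
    XeniaOrLevel l = gpairs PySem.Int.bor l := by
  rw [XeniaOrLevel, PySem.List.foldl_append_singleton_eq_map, List.nil_append,
    PySem.List.pyRange_of_pos 0 (PySem.List.len l) (by omega : (0 : Int) < 2)]
  have hr : (if (0 : Int) < PySem.List.len l
      then ((PySem.List.len l - 0 + 2 - 1) / 2).toNat else 0) = m := by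
    rw [PySem.List.len_eq, hl]; split <;> omega
  rw [hr, List.map_map]
  simpa [Function.comp] using map_range_gpairs PySem.Int.bor m l hl

theorem xorLevel_eq (m : Nat) (l : List Int) (hl : l.length = 2 * m) :
    XeniaXorLevel l = gpairs PySem.Int.bxor l := by
  rw [XeniaXorLevel, PySem.List.foldl_append_singleton_eq_map, List.nil_append,
    PySem.List.pyRange_of_pos 0 (PySem.List.len l) (by omega : (0 : Int) < 2)]
  have hr : (if (0 : Int) < PySem.List.len l
      then ((PySem.List.len l - 0 + 2 - 1) / 2).toNat else 0) = m := by
    rw [PySem.List.len_eq, hl]; split <;> omega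
  rw [hr, List.map_map]
  simpa [Function.comp] using map_range_gpairs PySem.Int.bxor m l hl

theorem Xenia_one (f : Bool) (x : Int) : Xenia f [x] = x := by
  rw [Xenia]
  simp [PySem.List.len_eq, PySem.List.pyGetD_zero_cons]

-- one unfolding of A on even length ≥ 2
theorem XeniaA_step (flag : Bool) (l : List Int) (m : Nat) (hm : 0 < m)
    (hl : l.length = 2 * m) :
    Xenia flag l = Xenia (!flag)
      (gpairs (if flag then PySem.Int.bor else PySem.Int.bxor) l) := by
  rw [Xenia]
  have h1 : ¬ (PySem.List.len l == 1) = true := by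
    simp [PySem.List.len_eq]; omega
  have h0 : ¬ l.length = 0 := by omega
  rw [dif_neg h1, dif_neg h0]
  cases flag with
  | true => rw [orLevel_eq m l hl]; rfl
  | false => rw [xorLevel_eq m l hl]; rfl

-- divide rule for A: on two power-of-two halves, A combines the halves' results
-- with the top-level operator: OR iff (#levels odd) == flag
theorem XeniaA_divide : ∀ (k : Nat) (flag : Bool) (l r : List Int),
    l.length = 2 ^ k → r.length = 2 ^ k →
    Xenia flag (l ++ r) =
      topOp (((k + 1) % 2 == 1) == flag) (Xenia flag l) (Xenia flag r) := by
  intro k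
  induction k with
  | zero =>
    intro flag l r hl hr
    match l, hl, r, hr with
    | [a], _, [b], _ =>
      show Xenia flag [a, b] = _
      rw [XeniaA_step flag [a, b] 1 (by omega) rfl]
      show Xenia (!flag) [(if flag then PySem.Int.bor else PySem.Int.bxor) a b] = _
      rw [Xenia_one, Xenia_one, Xenia_one]
      cases flag <;> rfl
  | succ k ih =>
    intro flag l r hl hr
    have hmL : l.length = 2 * 2 ^ k := by rw [hl]; ring
    have hmR : r.length = 2 * 2 ^ k := by rw [hr]; ring
    have hm : (l ++ r).length = 2 * 2 ^ (k + 1) := by simp [hl, hr]; ring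
    rw [XeniaA_step flag (l ++ r) (2 ^ (k + 1)) (by positivity) hm,
      gpairs_append _ (2 ^ k) l r hmL,
      XeniaA_step flag l (2 ^ k) (by positivity) hmL,
      XeniaA_step flag r (2 ^ k) (by positivity) hmR]
    have hL : (gpairs (if flag then PySem.Int.bor else PySem.Int.bxor) l).length = 2 ^ k :=
      gpairs_length2 _ (2 ^ k) l hmL
    have hR : (gpairs (if flag then PySem.Int.bor else PySem.Int.bxor) r).length = 2 ^ k :=
      gpairs_length2 _ (2 ^ k) r hmR
    rw [ih (!flag) _ _ hL hR]
    have hp : (((k + 1) % 2 == 1) == !flag) = (((k + 1 + 1) % 2 == 1) == flag) := by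
      rcases Nat.mod_two_eq_zero_or_one (k + 1) with h' | h' <;>
        cases flag <;> simp [h', Nat.add_mod]
    rw [hp]

theorem bitLength_two_pow : ∀ (j : Nat), PySem.Int.bitLength ((2 ^ j : Nat) : Int) = j + 1 := by
  intro j
  induction j with
  | zero => decide
  | succ j ih =>
    rw [PySem.Int.bitLength_natCast (by positivity : 0 < 2 ^ (j + 1))]
    have h2 : 2 ^ (j + 1) / 2 = 2 ^ j := by omega
    rw [h2, ih]

theorem Xenia_eq_alt : ∀ (k : Nat) (flag : Bool) (res : List Int),
    res.length = 2 ^ k → Xenia flag res = Xenia_alt flag res := by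
  intro k
  induction k with
  | zero =>
    intro flag res h
    match res, h with
    | [a], _ =>
      rw [Xenia_one, Xenia_alt]
      simp [PySem.List.len_eq, PySem.List.pyGetD_zero_cons]
  | succ k ih =>
    intro flag res h
    have h2 : 2 ≤ res.length := by rw [h]; exact Nat.one_lt_two_pow_iff.mpr (by omega)
    have hn1 : ¬ (PySem.List.len res == 1) = true := by
      simp [PySem.List.len_eq]; omega
    have hn0 : ¬ res.length = 0 := by omega
    have hfd : PySem.Int.floordiv (PySem.List.len res) 2 = ((res.length / 2 : Nat) : Int) := by
      rw [PySem.List.len_eq]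
      exact_mod_cast PySem.Int.floordiv_natCast res.length 2
    have hhalf : res.length / 2 = 2 ^ k := by omega
    -- unfold B one step (the local lets are zeta-expanded by the `show`, definitionally)
    rw [Xenia_alt, dif_neg hn1, dif_neg hn0]
    show Xenia flag res =
      (if (if PySem.Int.mod ((PySem.Int.bitLength (PySem.List.len res) : Int) - 1) 2 == 1
            then flag else !flag)
        then PySem.Int.bor
          (Xenia_alt flag (PySem.List.slice res none
            (some (PySem.Int.floordiv (PySem.List.len res) 2))))
          (Xenia_alt flag (PySem.List.slice res
            (some (PySem.Int.floordiv (PySem.List.len res) 2)) none))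
        else PySem.Int.bxor
          (Xenia_alt flag (PySem.List.slice res none
            (some (PySem.Int.floordiv (PySem.List.len res) 2))))
          (Xenia_alt flag (PySem.List.slice res
            (some (PySem.Int.floordiv (PySem.List.len res) 2)) none)))
    rw [hfd, PySem.List.slice_to res (by omega), PySem.List.slice_from res (by omega)]
    simp only [Int.toNat_natCast]
    have hTake : (res.take (res.length / 2)).length = 2 ^ k := by
      simp [hhalf]; omega
    have hDrop : (res.drop (res.length / 2)).length = 2 ^ k := by
      simp; omega
    -- A side: split res at the middle and apply the divide rule
    conv_lhs => rw [← List.take_append_drop (res.length / 2) res]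
    rw [XeniaA_divide k flag _ _ hTake hDrop, ih flag _ hTake, ih flag _ hDrop]
    -- the two top-operator selections coincide
    have hbl : PySem.Int.bitLength (PySem.List.len res) = k + 2 := by
      rw [PySem.List.len_eq, h, bitLength_two_pow]
    rw [hbl]
    have hcond : (if (PySem.Int.mod (((k + 2 : Nat) : Int) - 1) 2 == 1) then flag else !flag)
        = ((((k + 1) % 2 == 1) : Bool) == flag) := by
      have e : ((k + 2 : Nat) : Int) - 1 = ((k + 1 : Nat) : Int) := by push_cast; ring
      rw [e, show PySem.Int.mod ((k + 1 : Nat) : Int) 2 = (((k + 1) % 2 : Nat) : Int) from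
        PySem.Int.mod_natCast (k + 1) 2]
      rcases Nat.mod_two_eq_zero_or_one (k + 1) with h' | h' <;>
        simp [h']
    rw [hcond]
    rfl

-- ===== VERDICT (by name: the statement is the Claim_ definition above) =====
theorem Xenia_spec : Claim_equal_Xenia := by
  intro flag res _ hpre
  unfold Spec_Xenia
  exact Xenia_eq_alt (Nat.log2 res.length) flag res hpre
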